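-- pv_equiv track=rewrite | github.com/SkyFlash21/GIT_Donjon | Projet_Donjon_serveur/Util.py | generate_coordinate_codes
-- ===== SOURCE A (Python) =====
-- def generate_coordinate_codes(matrix,cord):
--     codes = {}
--     rows = len(matrix)
--     cols = len(matrix[0])
--
--     for i in range(rows):
--         for j in range(cols):
--             if matrix[i][j] != 3:
--                 continue
--
--             adjacent_count = 0
--             for dx in range(-1, 2):
--                 for dy in range(-1, 2):
--                     if dx == 0 and dy == 0:
--                         continue  # Skip the current coordinate
--                     x = i + dx
--                     y = j + dy
--                     if 0 <= x < rows and 0 <= y < cols and matrix[x][y] == 3: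
--                         adjacent_count += 1
--
--             code = format(adjacent_count, '04b')  # Convert the count to binary with 4 digits
--             codes[(i, j)] = code
--
--     return codes
-- ===== SOURCE B (Python) =====
-- OFFS = [(-1, -1), (-1, 0), (-1, 1), (0, -1), (0, 1), (1, -1), (1, 0), (1, 1)]
--
-- def generate_coordinate_codes(matrix, cord):
--     rows = len(matrix)
--     cols = len(matrix[0])
--     threes = [(i, j) for i in range(rows) for j in range(cols) if matrix[i][j] == 3]
--     targets = [(i + dx, j + dy) for (i, j) in threes for (dx, dy) in OFFS
--                if 0 <= i + dx < rows and 0 <= j + dy < cols]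
--     counts = {}
--     for q in targets:
--         counts[q] = counts.get(q, 0) + 1
--     return {p: format(counts.get(p, 0), '04b') for p in threes}
-- ===== Notes on version B (the rewrite author's own statement) =====
-- stated objective: alternative
-- what changed: A counts per 3-cell by probing all 8 neighbour matrix entries (gather); B first collects the 3-cell coordinates once, scatters +1 from each 3-cell to its in-bounds neighbours into a counts dict, then reads the codes off the dict for the 3-cells.
import Mathlib
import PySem

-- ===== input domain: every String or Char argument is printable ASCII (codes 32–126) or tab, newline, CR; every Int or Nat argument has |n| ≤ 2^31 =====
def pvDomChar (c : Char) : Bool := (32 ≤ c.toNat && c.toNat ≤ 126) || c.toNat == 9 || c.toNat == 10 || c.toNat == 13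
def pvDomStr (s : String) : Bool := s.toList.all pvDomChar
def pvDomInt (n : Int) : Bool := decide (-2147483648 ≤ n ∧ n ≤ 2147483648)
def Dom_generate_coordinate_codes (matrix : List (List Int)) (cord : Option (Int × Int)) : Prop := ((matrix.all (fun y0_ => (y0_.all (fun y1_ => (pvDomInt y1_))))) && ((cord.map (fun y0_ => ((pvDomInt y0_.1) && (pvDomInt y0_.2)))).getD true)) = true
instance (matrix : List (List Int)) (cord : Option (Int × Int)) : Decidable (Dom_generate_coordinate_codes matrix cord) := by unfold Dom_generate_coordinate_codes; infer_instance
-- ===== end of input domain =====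

-- B replaces A's per-cell 8-neighbour gather by collecting the 3-cells once and scattering +1
-- from each 3-cell to its in-bounds neighbours into a counts dict (objective: alternative).


-- matrix[x][y]; the getD defaults are unreachable under Pre_ and the bounds guards
def pvAt (m : List (List Int)) (x y : Int) : Int :=
  PySem.List.pyGetD (PySem.List.pyGetD m x []) y 0

-- format(n, '04b'); exact for 0 ≤ n < 16 (the only values reaching it: counts are ≤ 8)
def pvFmt04b (n : Int) : String :=
  String.ofList [if n.toNat / 8 % 2 = 1 then '1' else '0',
             if n.toNat / 4 % 2 = 1 then '1' else '0',
             if n.toNat / 2 % 2 = 1 then '1' else '0',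
             if n.toNat % 2 = 1 then '1' else '0']

-- ===== PORT A =====
def generate_coordinate_codes (matrix : List (List Int)) (cord : Option (Int × Int)) : List (Int × Int × String) :=
  let rows : Int := matrix.length
  let cols : Int := (matrix.headD []).length
  (PySem.List.pyRange 0 rows 1).foldl (fun codes i =>
    (PySem.List.pyRange 0 cols 1).foldl (fun codes j =>
      if pvAt matrix i j ≠ 3 then codes
      else
        let cnt : Int := (PySem.List.pyRange (-1) 2 1).foldl (fun c dx =>
          (PySem.List.pyRange (-1) 2 1).foldl (fun c dy =>
            if dx = 0 ∧ dy = 0 then c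
            else if 0 ≤ i + dx ∧ i + dx < rows ∧ 0 ≤ j + dy ∧ j + dy < cols ∧
                    pvAt matrix (i + dx) (j + dy) = 3 then c + 1 else c) c) 0
        codes ++ [(i, j, pvFmt04b cnt)]) codes) []
  -- codes is a dict keyed by the distinct pairs (i,j), so each insert appends a fresh entry

-- ===== PORT B =====
def pvOffs : List (Int × Int) := [(-1, -1), (-1, 0), (-1, 1), (0, -1), (0, 1), (1, -1), (1, 0), (1, 1)]

def generate_coordinate_codes_alt (matrix : List (List Int)) (cord : Option (Int × Int)) : List (Int × Int × String) :=
  let rows : Int := matrix.length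
  let cols : Int := (matrix.headD []).length
  let threes : List (Int × Int) :=
    (PySem.List.pyRange 0 rows 1).flatMap (fun i =>
      (PySem.List.pyRange 0 cols 1).filterMap (fun j =>
        if pvAt matrix i j = 3 then some (i, j) else none))
  let targets : List (Int × Int) :=
    threes.flatMap (fun p =>
      pvOffs.filterMap (fun d =>
        if 0 ≤ p.1 + d.1 ∧ p.1 + d.1 < rows ∧ 0 ≤ p.2 + d.2 ∧ p.2 + d.2 < cols
        then some (p.1 + d.1, p.2 + d.2) else none))
  let counts : PySem.Dict (Int × Int) Int :=
    targets.foldl (fun d q => d.insert q (d.getD q 0 + 1)) PySem.Dict.empty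
  threes.map (fun p => (p.1, p.2, pvFmt04b (counts.getD p 0)))

-- ===== PRECONDITION & SPEC =====
-- Pre_ excludes exactly the inputs where the Python raises IndexError: the empty matrix
-- (matrix[0]) and matrices with a row shorter than len(matrix[0]) (matrix[i][j], j < cols).
def Pre_generate_coordinate_codes (matrix : List (List Int)) (cord : Option (Int × Int)) : Prop :=
  matrix ≠ [] ∧ ∀ row ∈ matrix, (matrix.headD []).length ≤ row.length

instance (matrix : List (List Int)) (cord : Option (Int × Int)) : Decidable (Pre_generate_coordinate_codes matrix cord) := by unfold Pre_generate_coordinate_codes; infer_instance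

def pvWitness_generate_coordinate_codes : List (List Int) × (Option (Int × Int)) :=
  ([[3, 0], [1, 3]], none)

def Spec_generate_coordinate_codes (matrix : List (List Int)) (cord : Option (Int × Int)) (out : List (Int × Int × String)) : Prop := out = generate_coordinate_codes_alt matrix cord
instance (matrix : List (List Int)) (cord : Option (Int × Int)) (out : List (Int × Int × String)) : Decidable (Spec_generate_coordinate_codes matrix cord out) := by unfold Spec_generate_coordinate_codes; infer_instance

-- ===== CLAIM (what is proved, stated in full; the proofs are below) =====
def Claim_equal_generate_coordinate_codes : Prop := ∀ (matrix : List (List Int)) (cord : Option (Int × Int)), Dom_generate_coordinate_codes matrix cord → Pre_generate_coordinate_codes matrix cord → Spec_generate_coordinate_codes matrix cord (generate_coordinate_codes matrix cord)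

-- ===== LEMMAS AND PROOFS =====


theorem foldl_foldl_pairs {α : Type} (l1 l2 : List Int) (g : α → Int → Int → α) (a : α) :
  l1.foldl (fun c x => l2.foldl (fun c y => g c x y) c) a
  = (l1.flatMap (fun x => l2.map (fun y => (x, y)))).foldl (fun c p => g c p.1 p.2) a := by
  induction l1 generalizing a with
  | nil => rfl
  | cons x t ih => simp [List.foldl_append, List.foldl_map, ih]

theorem cnt_closed (m : List (List Int)) (R C i j : Int) :
  (PySem.List.pyRange (-1) 2 1).foldl (fun c dx =>
    (PySem.List.pyRange (-1) 2 1).foldl (fun c dy =>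
      if dx = 0 ∧ dy = 0 then c
      else if 0 ≤ i + dx ∧ i + dx < R ∧ 0 ≤ j + dy ∧ j + dy < C ∧ pvAt m (i+dx) (j+dy) = 3 then c + 1 else c) c) (0:Int)
  = ((pvOffs.countP (fun d => decide (0 ≤ i + d.1 ∧ i + d.1 < R ∧ 0 ≤ j + d.2 ∧ j + d.2 < C ∧ pvAt m (i+d.1) (j+d.2) = 3)) : Nat) : Int) := by
  have h : PySem.List.pyRange (-1) 2 1 = [-1, 0, 1] := by decide
  rw [h, foldl_foldl_pairs]
  have h9 : ([-1, 0, 1] : List Int).flatMap (fun x => ([-1,0,1] : List Int).map (fun y => (x, y)))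
      = [(-1,-1),(-1,0),(-1,1),(0,-1),(0,0),(0,1),(1,-1),(1,0),(1,1)] := by decide
  rw [h9]
  rw [show (fun (c : Int) (p : Int × Int) =>
        if p.1 = 0 ∧ p.2 = 0 then c
        else if 0 ≤ i + p.1 ∧ i + p.1 < R ∧ 0 ≤ j + p.2 ∧ j + p.2 < C ∧ pvAt m (i+p.1) (j+p.2) = 3 then c + 1 else c)
      = (fun (c : Int) (p : Int × Int) =>
        if ¬(p.1 = 0 ∧ p.2 = 0) then (if 0 ≤ i + p.1 ∧ i + p.1 < R ∧ 0 ≤ j + p.2 ∧ j + p.2 < C ∧ pvAt m (i+p.1) (j+p.2) = 3 then c + 1 else c) else c)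
      from by funext c p; rw [ite_not]]
  rw [PySem.List.foldl_ite_eq_foldl_filter]
  have hf : ([(-1,-1),(-1,0),(-1,1),(0,-1),(0,0),(0,1),(1,-1),(1,0),(1,1)] : List (Int × Int)).filter
      (fun p => decide ¬(p.1 = 0 ∧ p.2 = 0)) = pvOffs := by decide
  rw [hf, PySem.List.foldl_ite_add_one]
  simp



theorem mem_offsImg (F : Int × Int → Prop) [DecidablePred F] (a b : Int) (x : Int × Int) :
  x ∈ pvOffs.filterMap (fun d => if F (a + d.1, b + d.2) then some (a + d.1, b + d.2) else none)
  ↔ ((x.1 - a, x.2 - b) ∈ pvOffs ∧ F x) := by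
  simp only [List.mem_filterMap, Option.ite_none_right_eq_some, Option.some.injEq]
  constructor
  · rintro ⟨d, hd, hF, rfl⟩
    simpa [Prod.ext_iff] using ⟨by simpa [Prod.ext_iff] using hd, hF⟩
  · rintro ⟨hd, hF⟩
    exact ⟨(x.1 - a, x.2 - b), hd, by simpa using hF, by simp⟩

theorem nodup_offsImg (F : Int × Int → Prop) [DecidablePred F] (a b : Int) :
  (pvOffs.filterMap (fun d => if F (a + d.1, b + d.2) then some (a + d.1, b + d.2) else none)).Nodup := by
  apply List.Nodup.filterMap
  · intro d d' x hx hx'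
    split_ifs at hx hx' <;> simp_all
    simp [Prod.ext_iff] at hx hx' ⊢
    omega
  · decide

theorem off_neg (u v : Int) : (u, v) ∈ pvOffs ↔ (-u, -v) ∈ pvOffs := by
  simp [pvOffs, Prod.ext_iff]; omega

theorem mem_threes (m : List (List Int)) (R C : Int) (p : Int × Int) :
  p ∈ (PySem.List.pyRange 0 R 1).flatMap (fun i => (PySem.List.pyRange 0 C 1).filterMap (fun j => if pvAt m i j = 3 then some (i, j) else none))
  ↔ (0 ≤ p.1 ∧ p.1 < R ∧ 0 ≤ p.2 ∧ p.2 < C ∧ pvAt m p.1 p.2 = 3) := by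
  simp only [List.mem_flatMap, List.mem_filterMap, Option.ite_none_right_eq_some, Option.some.injEq,
    PySem.List.mem_pyRange_one]
  constructor
  · rintro ⟨i, hi, j, hj, h3, rfl⟩; exact ⟨hi.1, hi.2, hj.1, hj.2, h3⟩
  · rintro ⟨h1, h2, h3, h4, h5⟩; exact ⟨p.1, ⟨h1, h2⟩, p.2, ⟨h3, h4⟩, h5, rfl⟩

theorem nodup_threes (m : List (List Int)) (R C : Int) :
  ((PySem.List.pyRange 0 R 1).flatMap (fun i => (PySem.List.pyRange 0 C 1).filterMap (fun j => if pvAt m i j = 3 then some (i, j) else none))).Nodup := by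
  rw [List.nodup_flatMap]
  constructor
  · intro i _
    apply List.Nodup.filterMap
    · intro j j' x hx hx'
      split_ifs at hx hx' <;> simp_all
      simp [Prod.ext_iff] at hx hx'
      omega
    · exact PySem.List.nodup_pyRange_one 0 C
  · apply List.Pairwise.imp ?_ (PySem.List.pairwise_lt_pyRange_one 0 R)
    intro i i' hlt x hx hx'
    simp only [List.mem_filterMap] at hx hx'
    obtain ⟨j, _, hj⟩ := hx
    obtain ⟨j', _, hj'⟩ := hx'
    split_ifs at hj hj'; simp_all
    have h1 : x.1 = i := by rw [← hj]
    have h2 : x.1 = i' := by rw [← hj']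
    omega

theorem sum_map_ite_nat {α : Type} (P : α → Bool) (l : List α) :
  (l.map (fun x => if P x then 1 else 0)).sum = l.countP P := by
  induction l with
  | nil => rfl
  | cons x t ih => by_cases h : P x <;> simp [h, ih, Nat.add_comm]

theorem count_targets (m : List (List Int)) (R C : Int) (q : Int × Int)
    (hq : 0 ≤ q.1 ∧ q.1 < R ∧ 0 ≤ q.2 ∧ q.2 < C) :
    (((PySem.List.pyRange 0 R 1).flatMap (fun i => (PySem.List.pyRange 0 C 1).filterMap (fun j => if pvAt m i j = 3 then some (i, j) else none))).flatMap
      (fun p => pvOffs.filterMap (fun d =>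
        if 0 ≤ p.1 + d.1 ∧ p.1 + d.1 < R ∧ 0 ≤ p.2 + d.2 ∧ p.2 + d.2 < C
        then some (p.1 + d.1, p.2 + d.2) else none))).count q
    = pvOffs.countP (fun d => decide (0 ≤ q.1 + d.1 ∧ q.1 + d.1 < R ∧ 0 ≤ q.2 + d.2 ∧ q.2 + d.2 < C ∧ pvAt m (q.1 + d.1) (q.2 + d.2) = 3)) := by
  set threes := (PySem.List.pyRange 0 R 1).flatMap (fun i => (PySem.List.pyRange 0 C 1).filterMap (fun j => if pvAt m i j = 3 then some (i, j) else none)) with hthrees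
  rw [List.count_flatMap]
  -- each neighbour list contains q at most once
  have hnb : ∀ p : Int × Int,
      (pvOffs.filterMap (fun d =>
        if 0 ≤ p.1 + d.1 ∧ p.1 + d.1 < R ∧ 0 ≤ p.2 + d.2 ∧ p.2 + d.2 < C
        then some (p.1 + d.1, p.2 + d.2) else none)).count q
      = if (q.1 - p.1, q.2 - p.2) ∈ pvOffs then 1 else 0 := by
    intro p
    have hnd := nodup_offsImg (fun x => 0 ≤ x.1 ∧ x.1 < R ∧ 0 ≤ x.2 ∧ x.2 < C) p.1 p.2
    have hmem := mem_offsImg (fun x => 0 ≤ x.1 ∧ x.1 < R ∧ 0 ≤ x.2 ∧ x.2 < C) p.1 p.2 q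
    simp only at hnd hmem
    rw [List.Nodup.count hnd]
    simp only [hmem]
    have : ((q.1 - p.1, q.2 - p.2) ∈ pvOffs ∧ 0 ≤ q.1 ∧ q.1 < R ∧ 0 ≤ q.2 ∧ q.2 < C) ↔ (q.1 - p.1, q.2 - p.2) ∈ pvOffs := by
      constructor
      · exact fun h => h.1
      · exact fun h => ⟨h, hq⟩
    simp [this]
  calc (threes.map (List.count q ∘ fun p => pvOffs.filterMap (fun d =>
        if 0 ≤ p.1 + d.1 ∧ p.1 + d.1 < R ∧ 0 ≤ p.2 + d.2 ∧ p.2 + d.2 < C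
        then some (p.1 + d.1, p.2 + d.2) else none))).sum
      = (threes.map (fun p => if ((q.1 - p.1, q.2 - p.2) ∈ pvOffs : Bool) then 1 else 0)).sum := by
        apply congrArg
        apply List.map_congr_left
        intro p _
        simpa using hnb p
    _ = threes.countP (fun p => ((q.1 - p.1, q.2 - p.2) ∈ pvOffs : Bool)) := sum_map_ite_nat _ _
    _ = (threes.filter (fun p => ((q.1 - p.1, q.2 - p.2) ∈ pvOffs : Bool))).length := by
        rw [List.countP_eq_length_filter]
    _ = (pvOffs.filterMap (fun d =>
          if (0 ≤ q.1 + d.1 ∧ q.1 + d.1 < R ∧ 0 ≤ q.2 + d.2 ∧ q.2 + d.2 < C) ∧ pvAt m (q.1 + d.1) (q.2 + d.2) = 3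
          then some (q.1 + d.1, q.2 + d.2) else none)).length := by
        apply List.Perm.length_eq
        apply (List.perm_ext_iff_of_nodup ?_ ?_).mpr
        · intro x
          have hmem := mem_offsImg (fun y => (0 ≤ y.1 ∧ y.1 < R ∧ 0 ≤ y.2 ∧ y.2 < C) ∧ pvAt m y.1 y.2 = 3) q.1 q.2 x
          simp only at hmem
          have hmt := mem_threes m R C x
          rw [← hthrees] at hmt
          rw [List.mem_filter, hmt, hmem]
          constructor
          · rintro ⟨⟨h1,h2,h3,h4,h5⟩, hQ⟩
            simp only [decide_eq_true_eq] at hQ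
            refine ⟨?_, ⟨h1,h2,h3,h4⟩, h5⟩
            have := (off_neg (q.1 - x.1) (q.2 - x.2)).mp hQ
            simpa [neg_sub] using this
          · rintro ⟨hd, hb, h3⟩
            refine ⟨⟨hb.1, hb.2.1, hb.2.2.1, hb.2.2.2, h3⟩, ?_⟩
            simp only [decide_eq_true_eq]
            have := (off_neg (x.1 - q.1) (x.2 - q.2)).mp hd
            simpa [neg_sub] using this
        · have hnt := nodup_threes m R C
          rw [← hthrees] at hnt
          exact List.Nodup.filter _ hnt
        · exact nodup_offsImg (fun y => (0 ≤ y.1 ∧ y.1 < R ∧ 0 ≤ y.2 ∧ y.2 < C) ∧ pvAt m y.1 y.2 = 3) q.1 q.2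
    _ = pvOffs.countP (fun d => decide (0 ≤ q.1 + d.1 ∧ q.1 + d.1 < R ∧ 0 ≤ q.2 + d.2 ∧ q.2 + d.2 < C ∧ pvAt m (q.1 + d.1) (q.2 + d.2) = 3)) := by
        rw [List.length_filterMap_eq_countP]
        apply List.countP_congr
        intro d _
        split_ifs with h <;> simp_all


theorem filterMap_if_pair (l : List Int) (P : Int → Prop) [DecidablePred P] (i : Int) :
  l.filterMap (fun j => if P j then some ((i : Int), j) else none)
  = (l.filter (fun j => decide (P j))).map (fun j => (i, j)) := by
  induction l with
  | nil => rfl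
  | cons x t ih => by_cases h : P x <;> simp [h, ih]

-- ===== VERDICT (by name: the statement is the Claim_ definition above) =====
theorem generate_coordinate_codes_spec : Claim_equal_generate_coordinate_codes := by
  intro m cord _ _
  show generate_coordinate_codes m cord = generate_coordinate_codes_alt m cord
  simp only [generate_coordinate_codes, generate_coordinate_codes_alt]
  set R := (m.length : Int) with hR
  set C := ((m.headD []).length : Int) with hC
  -- A: inner loop appends, so it is a filter-map over the row
  have hinner : ∀ (i : Int) (codes : List (Int × Int × String)),
      (PySem.List.pyRange 0 C 1).foldl (fun codes j =>
        if pvAt m i j ≠ 3 then codes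
        else codes ++ [(i, j, pvFmt04b ((PySem.List.pyRange (-1) 2 1).foldl (fun c dx =>
          (PySem.List.pyRange (-1) 2 1).foldl (fun c dy =>
            if dx = 0 ∧ dy = 0 then c
            else if 0 ≤ i + dx ∧ i + dx < R ∧ 0 ≤ j + dy ∧ j + dy < C ∧
                    pvAt m (i + dx) (j + dy) = 3 then c + 1 else c) c) 0))]) codes
      = codes ++ ((PySem.List.pyRange 0 C 1).filter (fun j => decide (pvAt m i j = 3))).map
          (fun j => (i, j, pvFmt04b ((PySem.List.pyRange (-1) 2 1).foldl (fun c dx =>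
          (PySem.List.pyRange (-1) 2 1).foldl (fun c dy =>
            if dx = 0 ∧ dy = 0 then c
            else if 0 ≤ i + dx ∧ i + dx < R ∧ 0 ≤ j + dy ∧ j + dy < C ∧
                    pvAt m (i + dx) (j + dy) = 3 then c + 1 else c) c) 0))) := by
    intro i codes
    rw [show (fun (codes : List (Int × Int × String)) (j : Int) =>
        if pvAt m i j ≠ 3 then codes
        else codes ++ [(i, j, pvFmt04b ((PySem.List.pyRange (-1) 2 1).foldl (fun c dx =>
          (PySem.List.pyRange (-1) 2 1).foldl (fun c dy =>
            if dx = 0 ∧ dy = 0 then c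
            else if 0 ≤ i + dx ∧ i + dx < R ∧ 0 ≤ j + dy ∧ j + dy < C ∧
                    pvAt m (i + dx) (j + dy) = 3 then c + 1 else c) c) 0))])
      = (fun (codes : List (Int × Int × String)) (j : Int) =>
        if pvAt m i j = 3 then codes ++ [(i, j, pvFmt04b ((PySem.List.pyRange (-1) 2 1).foldl (fun c dx =>
          (PySem.List.pyRange (-1) 2 1).foldl (fun c dy =>
            if dx = 0 ∧ dy = 0 then c
            else if 0 ≤ i + dx ∧ i + dx < R ∧ 0 ≤ j + dy ∧ j + dy < C ∧
                    pvAt m (i + dx) (j + dy) = 3 then c + 1 else c) c) 0))] else codes)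
      from by funext codes j; rw [ite_not]]
    exact PySem.List.foldl_append_ite (fun j => pvAt m i j = 3) _ _ _
  rw [PySem.List.foldl_congr_mem _ _ _ _ (fun acc i hi => hinner i acc),
    PySem.List.foldl_append_eq_flatMap, List.nil_append, List.map_flatMap]
  apply List.flatMap_congr
  intro i hi
  rw [filterMap_if_pair (PySem.List.pyRange 0 C 1) (fun j => pvAt m i j = 3) i, List.map_map]
  apply List.map_congr_left
  intro j hj
  rw [List.mem_filter] at hj
  rw [PySem.List.mem_pyRange_one] at hi
  have hjr := (PySem.List.mem_pyRange_one ).mp hj.1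
  simp only [Function.comp_apply]
  congr 1
  congr 1
  rw [cnt_closed m R C i j]
  rw [PySem.Dict.getD_foldl_insert_add_one, PySem.Dict.getD_empty]
  have hc := count_targets m R C (i, j) ⟨hi.1, hi.2, hjr.1, hjr.2⟩
  simp only at hc
  rw [hc]
  simp
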